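-- pv_equiv track=rewrite | github.com/Rejean-McCormick/Grammatical_Framework_audit | app/utils/gf_utils.py | process_gf_line
-- ===== SOURCE A (Python) =====
-- def process_gf_line(line: str | None, in_block_comment: bool) -> tuple[str, str, bool]:
--     if line is None:
--         line = ""
--
--     keep_chars: list[str] = []
--     masked_chars: list[str] = []
--
--     in_string = False
--     index = 0
--
--     while index < len(line):
--         ch = line[index]
--         next_ch = line[index + 1] if index + 1 < len(line) else "\0"
--
--         if in_block_comment:
--             if ch == "-" and next_ch == "}":
--                 in_block_comment = False
--                 keep_chars.extend((" ", " "))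
--                 masked_chars.extend((" ", " "))
--                 index += 2
--                 continue
--
--             keep_chars.append(" ")
--             masked_chars.append(" ")
--             index += 1
--             continue
--
--         if in_string:
--             if ch == "\\" and next_ch != "\0":
--                 keep_chars.extend((ch, next_ch))
--                 masked_chars.extend((" ", " "))
--                 index += 2
--                 continue
--
--             if ch == '"':
--                 in_string = False
--                 keep_chars.append('"')
--                 masked_chars.append('"')
--                 index += 1
--                 continue
--
--             keep_chars.append(ch)
--             masked_chars.append(" ")
--             index += 1
--             continue
--
--         if ch == "{" and next_ch == "-":
--             in_block_comment = True
--             keep_chars.extend((" ", " "))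
--             masked_chars.extend((" ", " "))
--             index += 2
--             continue
--
--         if ch == "-" and next_ch == "-":
--             remaining = len(line) - index
--             keep_chars.extend(" " * remaining)
--             masked_chars.extend(" " * remaining)
--             break
--
--         if ch == '"':
--             in_string = True
--             keep_chars.append('"')
--             masked_chars.append('"')
--             index += 1
--             continue
--
--         keep_chars.append(ch)
--         masked_chars.append(ch)
--         index += 1
--
--     return "".join(keep_chars), "".join(masked_chars), in_block_comment
-- ===== SOURCE B (Python) =====
-- def process_gf_line(line, in_block_comment):
--     # Delimiter-jump rewrite: instead of a char-by-char state machine, repeatedly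
--     # str.find the next relevant delimiter for the current mode and copy/blank
--     # whole segments at once.
--     s = line or ""
--     keep = []
--     masked = []
--     in_string = False
--     while s:
--         n = len(s)
--         if in_block_comment:
--             j = s.find("-}")
--             if j == -1:
--                 keep.append(" " * n)
--                 masked.append(" " * n)
--                 s = ""
--             else:
--                 keep.append(" " * (j + 2))
--                 masked.append(" " * (j + 2))
--                 s = s[j + 2:]
--                 in_block_comment = False
--         elif in_string:
--             jb = s.find("\\")
--             jq = s.find('"')
--             cands = [x for x in (jb, jq) if x != -1]
--             if not cands:
--                 keep.append(s)
--                 masked.append(" " * n)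
--                 s = ""
--             else:
--                 j = min(cands)
--                 if j == jb:
--                     if j + 1 < n:
--                         keep.append(s[:j + 2])
--                         masked.append(" " * (j + 2))
--                         s = s[j + 2:]
--                     else:
--                         keep.append(s[:j] + "\\")
--                         masked.append(" " * n)
--                         s = ""
--                 else:
--                     keep.append(s[:j] + '"')
--                     masked.append(" " * j + '"')
--                     s = s[j + 1:]
--                     in_string = False
--         else:
--             jc = s.find("{-")
--             jl = s.find("--")
--             jq = s.find('"')
--             cands = [x for x in (jc, jl, jq) if x != -1]
--             if not cands:
--                 keep.append(s)
--                 masked.append(s)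
--                 s = ""
--             else:
--                 j = min(cands)
--                 if j == jq:
--                     keep.append(s[:j] + '"')
--                     masked.append(s[:j] + '"')
--                     s = s[j + 1:]
--                     in_string = True
--                 elif j == jl:
--                     keep.append(s[:j] + " " * (n - j))
--                     masked.append(s[:j] + " " * (n - j))
--                     s = ""
--                 else:
--                     keep.append(s[:j] + "  ")
--                     masked.append(s[:j] + "  ")
--                     s = s[j + 2:]
--                     in_block_comment = True
--     return "".join(keep), "".join(masked), in_block_comment
-- ===== Notes on version B (the rewrite author's own statement) =====
-- stated objective: faster
-- what changed: B replaces A's char-by-char index state machine with a delimiter-jump loop: in each mode it str.find-s the next relevant delimiter (-}; \ or "; {-/--/") and copies or blanks the whole segment up to it in one slice, instead of branching per character.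
import Mathlib
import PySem

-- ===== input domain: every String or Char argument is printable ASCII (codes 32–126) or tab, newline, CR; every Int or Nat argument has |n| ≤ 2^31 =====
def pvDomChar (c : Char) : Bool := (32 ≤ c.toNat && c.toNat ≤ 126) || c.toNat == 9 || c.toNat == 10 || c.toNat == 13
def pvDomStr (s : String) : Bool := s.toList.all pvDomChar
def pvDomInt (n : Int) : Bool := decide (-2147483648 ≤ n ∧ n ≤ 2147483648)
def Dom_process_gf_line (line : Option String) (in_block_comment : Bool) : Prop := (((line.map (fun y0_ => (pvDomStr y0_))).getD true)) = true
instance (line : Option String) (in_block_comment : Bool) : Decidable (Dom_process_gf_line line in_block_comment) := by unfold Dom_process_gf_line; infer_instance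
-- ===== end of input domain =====

-- B replaces A's per-character state machine with a delimiter-jump loop (find the next
-- relevant delimiter, copy/blank the whole segment in one slice); return values only.

-- ===== PORT A =====
-- A's while loop over the index, as recursion over the remaining characters;
-- next_ch's "\0" sentinel is Char.ofNat 0 (absent next char, as in Python's line[index+1] fallback).
def pvNul : Char := Char.ofNat 0

def pvALoop : List Char → Bool → Bool → List Char × List Char × Bool
  | [], _, bc => ([], [], bc)
  | c :: rest, inStr, bc =>
    if bc then
      if c = '-' && rest.headD pvNul = '}' then
        (' ' :: ' ' :: (pvALoop rest.tail inStr false).1,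
         ' ' :: ' ' :: (pvALoop rest.tail inStr false).2.1,
         (pvALoop rest.tail inStr false).2.2)
      else
        (' ' :: (pvALoop rest inStr bc).1,
         ' ' :: (pvALoop rest inStr bc).2.1,
         (pvALoop rest inStr bc).2.2)
    else if inStr then
      if c = '\\' && rest.headD pvNul ≠ pvNul then
        (c :: rest.headD pvNul :: (pvALoop rest.tail inStr bc).1,
         ' ' :: ' ' :: (pvALoop rest.tail inStr bc).2.1,
         (pvALoop rest.tail inStr bc).2.2)
      else if c = '"' then
        ('"' :: (pvALoop rest false bc).1,
         '"' :: (pvALoop rest false bc).2.1,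
         (pvALoop rest false bc).2.2)
      else
        (c :: (pvALoop rest inStr bc).1,
         ' ' :: (pvALoop rest inStr bc).2.1,
         (pvALoop rest inStr bc).2.2)
    else if c = '{' && rest.headD pvNul = '-' then
      (' ' :: ' ' :: (pvALoop rest.tail inStr true).1,
       ' ' :: ' ' :: (pvALoop rest.tail inStr true).2.1,
       (pvALoop rest.tail inStr true).2.2)
    else if c = '-' && rest.headD pvNul = '-' then
      (List.replicate (c :: rest).length ' ', List.replicate (c :: rest).length ' ', bc)
    else if c = '"' then
      ('"' :: (pvALoop rest true bc).1,
       '"' :: (pvALoop rest true bc).2.1,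
       (pvALoop rest true bc).2.2)
    else
      (c :: (pvALoop rest inStr bc).1,
       c :: (pvALoop rest inStr bc).2.1,
       (pvALoop rest inStr bc).2.2)
termination_by cs => cs.length
decreasing_by all_goals simp [List.length_tail] <;> omega

def process_gf_line (line : Option String) (in_block_comment : Bool) : String × String × Bool :=
  let s := match line with | none => "" | some l => l
  let r := pvALoop s.toList false in_block_comment
  (String.ofList r.1, String.ofList r.2.1, r.2.2)

-- ===== PORT B =====
-- s.find(a+b) for a two-character pattern: earliest i with s[i]=a and s[i+1]=b (none = -1).
def pvFind2 (a b : Char) : List Char → Option Nat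
  | [] => none
  | c :: rest =>
    if c = a && rest.headD pvNul = b then some 0
    else (pvFind2 a b rest).map (· + 1)

-- s.find(a) for a single character.
def pvFind1 (a : Char) : List Char → Option Nat
  | [] => none
  | c :: rest => if c = a then some 0 else (pvFind1 a rest).map (· + 1)

-- min(cands) over the found indices (none = pattern absent).
def pvMinO : Option Nat → Option Nat → Option Nat
  | none, b => b
  | some a, none => some a
  | some a, some b => some (min a b)

-- B's delimiter-jump loop over the remaining suffix.
def pvBGo : List Char → Bool → Bool → List Char × List Char × Bool
  | [], _, bc => ([], [], bc)
  | c :: cs, inStr, bc =>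
    if bc then
      match pvFind2 '-' '}' (c :: cs) with
      | none => (List.replicate (c :: cs).length ' ', List.replicate (c :: cs).length ' ', bc)
      | some j =>
        (List.replicate (j + 2) ' ' ++ (pvBGo ((c :: cs).drop (j + 2)) inStr false).1,
         List.replicate (j + 2) ' ' ++ (pvBGo ((c :: cs).drop (j + 2)) inStr false).2.1,
         (pvBGo ((c :: cs).drop (j + 2)) inStr false).2.2)
    else if inStr then
      match pvMinO (pvFind1 '\\' (c :: cs)) (pvFind1 '"' (c :: cs)) with
      | none => (c :: cs, List.replicate (c :: cs).length ' ', bc)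
      | some j =>
        if pvFind1 '\\' (c :: cs) = some j then
          if j + 1 < (c :: cs).length then
            ((c :: cs).take (j + 2) ++ (pvBGo ((c :: cs).drop (j + 2)) inStr bc).1,
             List.replicate (j + 2) ' ' ++ (pvBGo ((c :: cs).drop (j + 2)) inStr bc).2.1,
             (pvBGo ((c :: cs).drop (j + 2)) inStr bc).2.2)
          else
            ((c :: cs).take j ++ ['\\'], List.replicate (c :: cs).length ' ', bc)
        else
          ((c :: cs).take j ++ '"' :: (pvBGo ((c :: cs).drop (j + 1)) false bc).1,
           List.replicate j ' ' ++ '"' :: (pvBGo ((c :: cs).drop (j + 1)) false bc).2.1,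
           (pvBGo ((c :: cs).drop (j + 1)) false bc).2.2)
    else
      match pvMinO (pvMinO (pvFind2 '{' '-' (c :: cs)) (pvFind2 '-' '-' (c :: cs)))
          (pvFind1 '"' (c :: cs)) with
      | none => (c :: cs, c :: cs, bc)
      | some j =>
        if pvFind1 '"' (c :: cs) = some j then
          ((c :: cs).take j ++ '"' :: (pvBGo ((c :: cs).drop (j + 1)) true bc).1,
           (c :: cs).take j ++ '"' :: (pvBGo ((c :: cs).drop (j + 1)) true bc).2.1,
           (pvBGo ((c :: cs).drop (j + 1)) true bc).2.2)
        else if pvFind2 '-' '-' (c :: cs) = some j then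
          ((c :: cs).take j ++ List.replicate ((c :: cs).length - j) ' ',
           (c :: cs).take j ++ List.replicate ((c :: cs).length - j) ' ', bc)
        else
          ((c :: cs).take j ++ ' ' :: ' ' :: (pvBGo ((c :: cs).drop (j + 2)) inStr true).1,
           (c :: cs).take j ++ ' ' :: ' ' :: (pvBGo ((c :: cs).drop (j + 2)) inStr true).2.1,
           (pvBGo ((c :: cs).drop (j + 2)) inStr true).2.2)
termination_by cs => cs.length
decreasing_by all_goals simp [List.length_drop] <;> omega

def process_gf_line_alt (line : Option String) (in_block_comment : Bool) : String × String × Bool :=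
  let s := match line with | none => "" | some l => l
  let r := pvBGo s.toList false in_block_comment
  (String.ofList r.1, String.ofList r.2.1, r.2.2)

-- ===== PRECONDITION & SPEC =====
def Spec_process_gf_line (line : Option String) (in_block_comment : Bool) (out : String × String × Bool) : Prop := out = process_gf_line_alt line in_block_comment
instance (line : Option String) (in_block_comment : Bool) (out : String × String × Bool) : Decidable (Spec_process_gf_line line in_block_comment out) := by unfold Spec_process_gf_line; infer_instance

-- ===== CLAIM (what is proved, stated in full; the proofs are below) =====
def Claim_equal_process_gf_line : Prop := ∀ (line : Option String) (in_block_comment : Bool), Dom_process_gf_line line in_block_comment → Spec_process_gf_line line in_block_comment (process_gf_line line in_block_comment)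

-- ===== LEMMAS AND PROOFS =====
theorem pvA_block (cs : List Char) (inStr : Bool) :
    pvALoop cs inStr true =
      match pvFind2 '-' '}' cs with
      | none => (List.replicate cs.length ' ', List.replicate cs.length ' ', true)
      | some j =>
        (List.replicate (j + 2) ' ' ++ (pvALoop (cs.drop (j + 2)) inStr false).1,
         List.replicate (j + 2) ' ' ++ (pvALoop (cs.drop (j + 2)) inStr false).2.1,
         (pvALoop (cs.drop (j + 2)) inStr false).2.2) := by
  induction cs with
  | nil => simp [pvALoop, pvFind2]
  | cons c rest ih =>
    by_cases hcl : (c = '-' && rest.headD pvNul = '}') = true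
    · have e1 : pvALoop (c :: rest) inStr true =
          (' ' :: ' ' :: (pvALoop rest.tail inStr false).1,
           ' ' :: ' ' :: (pvALoop rest.tail inStr false).2.1,
           (pvALoop rest.tail inStr false).2.2) := by
        simp only [pvALoop]; rw [if_pos trivial, if_pos hcl]
      have e2 : pvFind2 '-' '}' (c :: rest) = some 0 := by
        simp only [pvFind2]; rw [if_pos hcl]
      rw [e1, e2]
      simp [List.drop_one, List.replicate_succ]
    · have e1 : pvALoop (c :: rest) inStr true =
          (' ' :: (pvALoop rest inStr true).1,
           ' ' :: (pvALoop rest inStr true).2.1,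
           (pvALoop rest inStr true).2.2) := by
        simp only [pvALoop]; rw [if_pos trivial, if_neg hcl]
      have e2 : pvFind2 '-' '}' (c :: rest) = (pvFind2 '-' '}' rest).map (· + 1) := by
        simp only [pvFind2]; rw [if_neg hcl]
      rw [e1, e2, ih]
      cases hf : pvFind2 '-' '}' rest with
      | none => simp [List.replicate_succ]
      | some j =>
        have : j + 1 + 2 = (j + 2) + 1 := by omega
        simp [this, List.replicate_succ, List.drop_succ_cons]

theorem pvA_string (cs : List Char) (hn : pvNul ∉ cs) :
    pvALoop cs true false =
      match pvMinO (pvFind1 '\\' cs) (pvFind1 '"' cs) with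
      | none => (cs, List.replicate cs.length ' ', false)
      | some j =>
        if pvFind1 '\\' cs = some j then
          if j + 1 < cs.length then
            (cs.take (j + 2) ++ (pvALoop (cs.drop (j + 2)) true false).1,
             List.replicate (j + 2) ' ' ++ (pvALoop (cs.drop (j + 2)) true false).2.1,
             (pvALoop (cs.drop (j + 2)) true false).2.2)
          else
            (cs.take j ++ ['\\'], List.replicate cs.length ' ', false)
        else
          (cs.take j ++ '"' :: (pvALoop (cs.drop (j + 1)) false false).1,
           List.replicate j ' ' ++ '"' :: (pvALoop (cs.drop (j + 1)) false false).2.1,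
           (pvALoop (cs.drop (j + 1)) false false).2.2) := by
  induction cs with
  | nil => simp [pvALoop, pvFind1, pvMinO]
  | cons c rest ih =>
    have hnr : pvNul ∉ rest := fun h => hn (List.mem_cons_of_mem _ h)
    by_cases hb : c = '\\'
    · subst hb
      have ejb : pvFind1 '\\' ('\\' :: rest) = some 0 := by simp [pvFind1]
      cases rest with
      | nil =>
        have eA : pvALoop ['\\'] true false = (['\\'], [' '], false) := by
          simp [pvALoop, pvNul]
        rw [eA]
        simp [pvFind1, pvMinO]
      | cons h t =>
        have hh : h ≠ pvNul := fun e => hn (by simp [e])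
        have eA : pvALoop ('\\' :: h :: t) true false =
            ('\\' :: h :: (pvALoop t true false).1,
             ' ' :: ' ' :: (pvALoop t true false).2.1,
             (pvALoop t true false).2.2) := by
          simp [pvALoop, hh]
        rw [eA, ejb]
        cases hq : pvFind1 '"' ('\\' :: h :: t) with
        | none => simp [pvMinO, List.replicate_succ]
        | some k =>
          have hmin : pvMinO (some 0) (some k) = some 0 := by simp [pvMinO]
          rw [hmin]
          simp [List.replicate_succ]
    · by_cases hq : c = '"'
      · subst hq
        have ejq : pvFind1 '"' ('"' :: rest) = some 0 := by simp [pvFind1]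
        have ejb : pvFind1 '\\' ('"' :: rest) = (pvFind1 '\\' rest).map (· + 1) := by
          simp [pvFind1]
        have eA : pvALoop ('"' :: rest) true false =
            ('"' :: (pvALoop rest false false).1,
             '"' :: (pvALoop rest false false).2.1,
             (pvALoop rest false false).2.2) := by
          simp [pvALoop]
        rw [eA, ejq, ejb]
        have hmin : pvMinO ((pvFind1 '\\' rest).map (· + 1)) (some 0) = some 0 := by
          cases pvFind1 '\\' rest <;> simp [pvMinO]
        rw [hmin]
        have hne : ¬ Option.map (fun x => x + 1) (pvFind1 '\\' rest) = some 0 := by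
          cases pvFind1 '\\' rest <;> simp
        simp [hne]
      · have ejb : pvFind1 '\\' (c :: rest) = (pvFind1 '\\' rest).map (· + 1) := by
          simp [pvFind1, hb]
        have ejq : pvFind1 '"' (c :: rest) = (pvFind1 '"' rest).map (· + 1) := by
          simp [pvFind1, hq]
        have eA : pvALoop (c :: rest) true false =
            (c :: (pvALoop rest true false).1,
             ' ' :: (pvALoop rest true false).2.1,
             (pvALoop rest true false).2.2) := by
          simp [pvALoop, hb, hq]
        rw [eA, ejb, ejq, ih hnr]
        have hmm : pvMinO ((pvFind1 '\\' rest).map (· + 1)) ((pvFind1 '"' rest).map (· + 1))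
            = (pvMinO (pvFind1 '\\' rest) (pvFind1 '"' rest)).map (· + 1) := by
          cases pvFind1 '\\' rest <;> cases pvFind1 '"' rest <;>
            simp [pvMinO, Nat.add_min_add_right]
        rw [hmm]
        cases hm : pvMinO (pvFind1 '\\' rest) (pvFind1 '"' rest) with
        | none => simp [List.replicate_succ]
        | some j =>
          simp only [Option.map_some]
          have hiff : ((pvFind1 '\\' rest).map (· + 1) = some (j + 1)) ↔
              (pvFind1 '\\' rest = some j) := by
            cases pvFind1 '\\' rest <;> simp
          by_cases hjb : pvFind1 '\\' rest = some j
          · rw [if_pos hjb, if_pos (hiff.mpr hjb)]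
            by_cases hlt : j + 1 < rest.length
            · rw [if_pos hlt, if_pos (by simp; omega)]
              have e2 : j + 1 + 2 = (j + 2) + 1 := rfl
              simp [e2, List.replicate_succ]
            · rw [if_neg hlt, if_neg (by simp; omega)]
              simp [List.replicate_succ]
          · rw [if_neg hjb, if_neg (fun e => hjb (hiff.mp e))]
            simp [List.replicate_succ]

theorem pvA_out (cs : List Char) :
    pvALoop cs false false =
      match pvMinO (pvMinO (pvFind2 '{' '-' cs) (pvFind2 '-' '-' cs)) (pvFind1 '"' cs) with
      | none => (cs, cs, false)
      | some j =>
        if pvFind1 '"' cs = some j then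
          (cs.take j ++ '"' :: (pvALoop (cs.drop (j + 1)) true false).1,
           cs.take j ++ '"' :: (pvALoop (cs.drop (j + 1)) true false).2.1,
           (pvALoop (cs.drop (j + 1)) true false).2.2)
        else if pvFind2 '-' '-' cs = some j then
          (cs.take j ++ List.replicate (cs.length - j) ' ',
           cs.take j ++ List.replicate (cs.length - j) ' ', false)
        else
          (cs.take j ++ ' ' :: ' ' :: (pvALoop (cs.drop (j + 2)) false true).1,
           cs.take j ++ ' ' :: ' ' :: (pvALoop (cs.drop (j + 2)) false true).2.1,
           (pvALoop (cs.drop (j + 2)) false true).2.2) := by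
  induction cs with
  | nil => simp [pvALoop, pvFind1, pvFind2, pvMinO]
  | cons c rest ih =>
    by_cases hc : c = '{' ∧ rest.headD pvNul = '-'
    · obtain ⟨hc1, hc2⟩ := hc; subst hc1
      have hc2' : rest.head?.getD pvNul = '-' := by simpa using hc2
      have eA : pvALoop ('{' :: rest) false false =
          (' ' :: ' ' :: (pvALoop rest.tail false true).1,
           ' ' :: ' ' :: (pvALoop rest.tail false true).2.1,
           (pvALoop rest.tail false true).2.2) := by
        simp [pvALoop, hc2']
      have ejc : pvFind2 '{' '-' ('{' :: rest) = some 0 := by simp [pvFind2, hc2']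
      have ejl : pvFind2 '-' '-' ('{' :: rest) = (pvFind2 '-' '-' rest).map (· + 1) := by
        simp [pvFind2]
      have ejq : pvFind1 '"' ('{' :: rest) = (pvFind1 '"' rest).map (· + 1) := by
        simp [pvFind1]
      rw [eA, ejc, ejl, ejq]
      have hmin : pvMinO (pvMinO (some 0) ((pvFind2 '-' '-' rest).map (· + 1)))
          ((pvFind1 '"' rest).map (· + 1)) = some 0 := by
        cases pvFind2 '-' '-' rest <;> cases pvFind1 '"' rest <;> simp [pvMinO]
      rw [hmin]
      have h1 : ¬ (pvFind1 '"' rest).map (· + 1) = some 0 := by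
        cases pvFind1 '"' rest <;> simp
      have h2 : ¬ (pvFind2 '-' '-' rest).map (· + 1) = some 0 := by
        cases pvFind2 '-' '-' rest <;> simp
      simp [h1, h2, List.drop_one]
    · by_cases hl : c = '-' ∧ rest.headD pvNul = '-'
      · obtain ⟨hl1, hl2⟩ := hl; subst hl1
        have hl2' : rest.head?.getD pvNul = '-' := by simpa using hl2
        have eA : pvALoop ('-' :: rest) false false =
            (List.replicate ('-' :: rest).length ' ',
             List.replicate ('-' :: rest).length ' ', false) := by
          simp [pvALoop, hl2']
        have ejc : pvFind2 '{' '-' ('-' :: rest) = (pvFind2 '{' '-' rest).map (· + 1) := by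
          simp [pvFind2]
        have ejl : pvFind2 '-' '-' ('-' :: rest) = some 0 := by simp [pvFind2, hl2']
        have ejq : pvFind1 '"' ('-' :: rest) = (pvFind1 '"' rest).map (· + 1) := by
          simp [pvFind1]
        rw [eA, ejc, ejl, ejq]
        have hmin : pvMinO (pvMinO ((pvFind2 '{' '-' rest).map (· + 1)) (some 0))
            ((pvFind1 '"' rest).map (· + 1)) = some 0 := by
          cases pvFind2 '{' '-' rest <;> cases pvFind1 '"' rest <;> simp [pvMinO]
        rw [hmin]
        have h1 : ¬ (pvFind1 '"' rest).map (· + 1) = some 0 := by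
          cases pvFind1 '"' rest <;> simp
        simp [h1]
      · by_cases hq : c = '"'
        · subst hq
          have eA : pvALoop ('"' :: rest) false false =
              ('"' :: (pvALoop rest true false).1,
               '"' :: (pvALoop rest true false).2.1,
               (pvALoop rest true false).2.2) := by
            simp [pvALoop]
          have ejc : pvFind2 '{' '-' ('"' :: rest) = (pvFind2 '{' '-' rest).map (· + 1) := by
            simp [pvFind2]
          have ejl : pvFind2 '-' '-' ('"' :: rest) = (pvFind2 '-' '-' rest).map (· + 1) := by
            simp [pvFind2]
          have ejq : pvFind1 '"' ('"' :: rest) = some 0 := by simp [pvFind1]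
          rw [eA, ejc, ejl, ejq]
          have hmin : pvMinO (pvMinO ((pvFind2 '{' '-' rest).map (· + 1))
              ((pvFind2 '-' '-' rest).map (· + 1))) (some 0) = some 0 := by
            cases pvFind2 '{' '-' rest <;> cases pvFind2 '-' '-' rest <;> simp [pvMinO]
          rw [hmin]
          simp
        · have hbl : ¬ (c = '{' && rest.headD pvNul = '-') = true := by
            simp; intro h1; exact fun h2 => hc ⟨h1, by simpa using h2⟩
          have hll : ¬ (c = '-' && rest.headD pvNul = '-') = true := by
            simp; intro h1; exact fun h2 => hl ⟨h1, by simpa using h2⟩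
          have eA : pvALoop (c :: rest) false false =
              (c :: (pvALoop rest false false).1,
               c :: (pvALoop rest false false).2.1,
               (pvALoop rest false false).2.2) := by
            simp only [pvALoop, Bool.false_eq_true, if_false]
            rw [if_neg hbl, if_neg hll, if_neg hq]
          have ejc : pvFind2 '{' '-' (c :: rest) = (pvFind2 '{' '-' rest).map (· + 1) := by
            simp only [pvFind2]; rw [if_neg hbl]
          have ejl : pvFind2 '-' '-' (c :: rest) = (pvFind2 '-' '-' rest).map (· + 1) := by
            simp only [pvFind2]; rw [if_neg hll]
          have ejq : pvFind1 '"' (c :: rest) = (pvFind1 '"' rest).map (· + 1) := by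
            simp [pvFind1, hq]
          rw [eA, ejc, ejl, ejq, ih]
          have hmm : pvMinO (pvMinO ((pvFind2 '{' '-' rest).map (· + 1))
              ((pvFind2 '-' '-' rest).map (· + 1))) ((pvFind1 '"' rest).map (· + 1))
              = (pvMinO (pvMinO (pvFind2 '{' '-' rest) (pvFind2 '-' '-' rest))
                  (pvFind1 '"' rest)).map (· + 1) := by
            cases pvFind2 '{' '-' rest <;> cases pvFind2 '-' '-' rest <;>
              cases pvFind1 '"' rest <;> simp [pvMinO, Nat.add_min_add_right]
          rw [hmm]
          cases hm : pvMinO (pvMinO (pvFind2 '{' '-' rest) (pvFind2 '-' '-' rest))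
              (pvFind1 '"' rest) with
          | none => simp
          | some j =>
            simp only [Option.map_some]
            have hiffq : ((pvFind1 '"' rest).map (· + 1) = some (j + 1)) ↔
                (pvFind1 '"' rest = some j) := by
              cases pvFind1 '"' rest <;> simp
            have hiffl : ((pvFind2 '-' '-' rest).map (· + 1) = some (j + 1)) ↔
                (pvFind2 '-' '-' rest = some j) := by
              cases pvFind2 '-' '-' rest <;> simp
            by_cases hjq : pvFind1 '"' rest = some j
            · rw [if_pos hjq, if_pos (hiffq.mpr hjq)]
              simp
            · rw [if_neg hjq, if_neg (fun e => hjq (hiffq.mp e))]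
              by_cases hjl : pvFind2 '-' '-' rest = some j
              · rw [if_pos hjl, if_pos (hiffl.mpr hjl)]
                have e1 : rest.length + 1 - (j + 1) = rest.length - j := by omega
                simp [e1]
              · rw [if_neg hjl, if_neg (fun e => hjl (hiffl.mp e))]
                simp

theorem pvMain (cs : List Char) (inStr bc : Bool) :
    pvNul ∉ cs → pvALoop cs inStr bc = pvBGo cs inStr bc := by
  fun_induction pvBGo cs inStr bc
  case case1 => intro _; simp [pvALoop]
  case case2 c rest inStr hf => intro hn; rw [pvA_block, hf]
  case case3 c rest inStr j hf ih =>
    intro hn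
    rw [pvA_block, hf]
    have ih' := ih (fun hm => hn (List.mem_of_mem_drop hm))
    rw [List.drop_succ_cons] at ih'
    simp [ih']
  case case4 c rest bc hbc hm =>
    intro hn
    simp only [Bool.not_eq_true] at hbc; subst hbc
    rw [pvA_string _ hn, hm]
  case case5 c rest bc hbc j hm hjb hlt ih =>
    intro hn
    simp only [Bool.not_eq_true] at hbc; subst hbc
    rw [pvA_string _ hn, hm]
    have ih' := ih (fun hmem => hn (List.mem_of_mem_drop hmem))
    rw [List.drop_succ_cons] at ih'
    simp [if_pos hjb, if_pos hlt, ih']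
    intro h; exfalso; simp at hlt; omega
  case case6 c rest bc hbc j hm hjb hlt =>
    intro hn
    simp only [Bool.not_eq_true] at hbc; subst hbc
    rw [pvA_string _ hn, hm]
    simp [if_pos hjb, if_neg hlt]
    intro h; exfalso; simp at hlt; omega
  case case7 c rest bc hbc j hm hjb ih =>
    intro hn
    simp only [Bool.not_eq_true] at hbc; subst hbc
    rw [pvA_string _ hn, hm]
    have ih' := ih (fun hmem => hn (List.mem_of_mem_drop hmem))
    rw [List.drop_succ_cons] at ih'
    simp [if_neg hjb, ih']
  case case8 c rest inStr bc hbc hins hm =>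
    intro hn
    simp only [Bool.not_eq_true] at hbc hins; subst hbc; subst hins
    rw [pvA_out, hm]
  case case9 c rest inStr bc hbc hins j hm hjq ih =>
    intro hn
    simp only [Bool.not_eq_true] at hbc hins; subst hbc; subst hins
    rw [pvA_out, hm]
    have ih' := ih (fun hmem => hn (List.mem_of_mem_drop hmem))
    rw [List.drop_succ_cons] at ih'
    simp [if_pos hjq, ih']
  case case10 c rest inStr bc hbc hins j hm hjq hjl =>
    intro hn
    simp only [Bool.not_eq_true] at hbc hins; subst hbc; subst hins
    rw [pvA_out, hm]
    simp [if_neg hjq, if_pos hjl]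
  case case11 c rest inStr bc hbc hins j hm hjq hjl ih =>
    intro hn
    simp only [Bool.not_eq_true] at hbc hins; subst hbc; subst hins
    rw [pvA_out, hm]
    have ih' := ih (fun hmem => hn (List.mem_of_mem_drop hmem))
    rw [List.drop_succ_cons] at ih'
    simp [if_neg hjq, if_neg hjl, ih']

-- ===== VERDICT (by name: the statement is the Claim_ definition above) =====
theorem process_gf_line_spec : Claim_equal_process_gf_line := by
  intro line bc hdom
  unfold Spec_process_gf_line process_gf_line process_gf_line_alt
  have hn : pvNul ∉ (match line with | none => "" | some l => l).toList := by
    cases line with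
    | none => simp
    | some l =>
      simp only [Dom_process_gf_line, Option.map_some, Option.getD_some] at hdom
      intro hmem
      have := List.all_eq_true.mp hdom _ hmem
      simp [pvDomChar, pvNul] at this
  simp only [pvMain _ _ _ hn]
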